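-- pv_equiv track=rewrite | github.com/FreshbirdZhao/LLMs_Jailbreak | Analyze/plotting.py | _build_mapping_table_data
-- ===== SOURCE A (Python) =====
-- import math
--
-- def _build_mapping_table_data(legend_rows: list[tuple[str, str]]) -> tuple[list[str], list[list[str]]]:
--     if not legend_rows:
--         return (["ID", "Full Name"], [])
--
--     num_cols = max(1, math.ceil(len(legend_rows) / 8))
--     rows_per_col = math.ceil(len(legend_rows) / num_cols)
--     headers: list[str] = []
--     for _ in range(num_cols):
--         headers.extend(["ID", "Full Name"])
--
--     cell_rows: list[list[str]] = []
--     for row_idx in range(rows_per_col):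
--         row_cells: list[str] = []
--         for col_idx in range(num_cols):
--             item_idx = col_idx * rows_per_col + row_idx
--             if item_idx < len(legend_rows):
--                 row_cells.extend(list(legend_rows[item_idx]))
--             else:
--                 row_cells.extend(["", ""])
--         cell_rows.append(row_cells)
--     return headers, cell_rows
-- ===== SOURCE B (Python) =====
-- import math
--
-- def _build_mapping_table_data(legend_rows):
--     if not legend_rows:
--         return (["ID", "Full Name"], [])
--     num_cols = max(1, math.ceil(len(legend_rows) / 8))
--     rows_per_col = math.ceil(len(legend_rows) / num_cols)
--     columns = [legend_rows[c * rows_per_col:(c + 1) * rows_per_col] for c in range(num_cols)]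
--     columns = [col + [("", "")] * (rows_per_col - len(col)) for col in columns]
--     headers = ["ID", "Full Name"] * num_cols
--     cell_rows = [[cell for col in columns for cell in col[r]] for r in range(rows_per_col)]
--     return headers, cell_rows
-- ===== Notes on version B (the rewrite author's own statement) =====
-- stated objective: alternative
-- what changed: Replaces A's nested index-arithmetic loops (item_idx = col*rows_per_col+row per cell) with a slice-into-columns then transpose decomposition: contiguous chunks padded to rows_per_col, rows read off positionally.
import Mathlib
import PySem

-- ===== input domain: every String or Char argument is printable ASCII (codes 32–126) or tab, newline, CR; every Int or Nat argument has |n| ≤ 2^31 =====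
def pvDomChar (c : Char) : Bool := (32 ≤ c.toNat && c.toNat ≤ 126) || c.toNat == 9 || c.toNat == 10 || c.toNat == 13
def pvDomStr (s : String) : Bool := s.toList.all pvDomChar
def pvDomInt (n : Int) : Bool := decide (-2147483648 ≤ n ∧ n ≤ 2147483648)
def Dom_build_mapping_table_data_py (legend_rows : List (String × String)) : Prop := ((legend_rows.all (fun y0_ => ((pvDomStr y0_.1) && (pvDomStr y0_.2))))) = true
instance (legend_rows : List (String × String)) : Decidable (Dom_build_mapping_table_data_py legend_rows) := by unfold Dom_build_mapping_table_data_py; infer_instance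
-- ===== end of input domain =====

-- B reshapes by slicing into padded columns and transposing, instead of A's nested
-- index-arithmetic loops; alternative decomposition, same complexity.

-- ===== PORT A =====
-- math.ceil(a / b) on Nat-sized lists is exactly (a + b - 1) / b in Nat arithmetic.
def build_mapping_table_data_py (legend_rows : List (String × String)) : List String × List (List String) :=
  if legend_rows = [] then (["ID", "Full Name"], [])
  else
    let n := legend_rows.length
    let num_cols := max 1 ((n + 8 - 1) / 8)
    let rows_per_col := (n + num_cols - 1) / num_cols
    let headers := (List.range num_cols).foldl (fun acc _ => acc ++ ["ID", "Full Name"]) []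
    let cell_rows := (List.range rows_per_col).foldl (fun acc row_idx =>
        let row_cells := (List.range num_cols).foldl (fun rc col_idx =>
            let item_idx := col_idx * rows_per_col + row_idx
            if item_idx < n then
              -- legend_rows[item_idx], guarded in range, list(tuple) flattens the pair
              let p := legend_rows.getD item_idx ("", "")
              rc ++ [p.1, p.2]
            else rc ++ ["", ""]) []
        acc ++ [row_cells]) []
    (headers, cell_rows)

-- ===== PORT B =====
-- legend_rows[c*rpc:(c+1)*rpc] with nonnegative bounds is exactly (drop (c*rpc)).take rpc.
def build_mapping_table_data_py_alt (legend_rows : List (String × String)) : List String × List (List String) :=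
  if legend_rows = [] then (["ID", "Full Name"], [])
  else
    let n := legend_rows.length
    let num_cols := max 1 ((n + 8 - 1) / 8)
    let rows_per_col := (n + num_cols - 1) / num_cols
    let columns := (List.range num_cols).map
        (fun c => (legend_rows.drop (c * rows_per_col)).take rows_per_col)
    let columns2 := columns.map
        (fun col => col ++ List.replicate (rows_per_col - col.length) ("", ""))
    let headers := (List.replicate num_cols (["ID", "Full Name"] : List String)).flatten
    let cell_rows := (List.range rows_per_col).map (fun r =>
        columns2.flatMap (fun col =>
          let p := col.getD r ("", "")
          [p.1, p.2]))
    (headers, cell_rows)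

-- ===== PRECONDITION & SPEC =====
def Spec_build_mapping_table_data_py (legend_rows : List (String × String)) (out : List String × List (List String)) : Prop := out = build_mapping_table_data_py_alt legend_rows
instance (legend_rows : List (String × String)) (out : List String × List (List String)) : Decidable (Spec_build_mapping_table_data_py legend_rows out) := by unfold Spec_build_mapping_table_data_py; infer_instance

-- ===== CLAIM (what is proved, stated in full; the proofs are below) =====
def Claim_equal_build_mapping_table_data_py : Prop := ∀ (legend_rows : List (String × String)), Dom_build_mapping_table_data_py legend_rows → Spec_build_mapping_table_data_py legend_rows (build_mapping_table_data_py legend_rows)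

-- ===== LEMMAS AND PROOFS =====

-- A padded column read at a position below rows_per_col is the flat list read at the
-- column-major index (the default pair covers both the pad and the out-of-range tail).
theorem pv_padcol_getD (xs : List (String × String)) (m rpc r : Nat) (hr : r < rpc) :
    ((xs.drop m).take rpc ++
      List.replicate (rpc - ((xs.drop m).take rpc).length) (("", "") : String × String)).getD r ("", "")
    = xs.getD (m + r) ("", "") := by
  simp only [List.getD_eq_getElem?_getD, List.getElem?_append, List.length_take,
    List.length_drop, List.getElem?_take, List.getElem?_drop, List.getElem?_replicate]
  by_cases h : r < min rpc (xs.length - m)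
  · simp [h, hr]
  · have hn : xs.length ≤ m + r := by omega
    simp [h, List.getElem?_eq_none hn]
    have hpad : r - min rpc (xs.length - m) < rpc - min rpc (xs.length - m) := by omega
    simp [hpad]

-- flat repetition of a constant block
theorem pv_flatMap_const_range (k : Nat) (L : List String) :
    (List.range k).flatMap (fun _ => L) = (List.replicate k L).flatten := by
  induction k with
  | zero => simp
  | succ k ih => simp [List.range_succ, List.replicate_succ', ih]

-- ===== VERDICT (by name: the statement is the Claim_ definition above) =====
theorem build_mapping_table_data_py_spec : Claim_equal_build_mapping_table_data_py := by
  intro xs _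
  unfold Spec_build_mapping_table_data_py build_mapping_table_data_py build_mapping_table_data_py_alt
  by_cases hxs : xs = []
  · simp [hxs]
  · simp only [if_neg hxs]
    set n := xs.length with hn
    set nc := max 1 ((n + 8 - 1) / 8) with hnc
    set rpc := (n + nc - 1) / nc with hrpc
    refine Prod.ext ?_ ?_
    · simp only [PySem.List.foldl_append_eq_flatMap, List.nil_append]
      exact pv_flatMap_const_range nc _
    · simp only [PySem.List.foldl_append_eq_flatMap, List.nil_append, List.flatMap_map,
        ← List.map_eq_flatMap]
      refine List.map_congr_left (fun r hr => ?_)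
      have hr' : r < rpc := List.mem_range.mp hr
      have hfun : (fun (rc : List String) (col_idx : Nat) =>
            if col_idx * rpc + r < n then
              rc ++ [(xs.getD (col_idx * rpc + r) ("", "")).1,
                     (xs.getD (col_idx * rpc + r) ("", "")).2]
            else rc ++ ["", ""])
          = (fun (rc : List String) (col_idx : Nat) => rc ++
              (if col_idx * rpc + r < n then
                [(xs.getD (col_idx * rpc + r) ("", "")).1,
                 (xs.getD (col_idx * rpc + r) ("", "")).2]
              else ["", ""])) := by
        funext rc c; split <;> rfl
      rw [hfun, PySem.List.foldl_append_eq_flatMap, List.nil_append]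
      simp only [List.flatMap_def]
      refine congrArg List.flatten (List.map_congr_left (fun c _ => ?_))
      rw [pv_padcol_getD xs (c * rpc) rpc r hr']
      by_cases hi : c * rpc + r < n
      · simp [hi]
      · have h0 : xs[c * rpc + r]? = none :=
          List.getElem?_eq_none (by omega : xs.length ≤ c * rpc + r)
        simp [hi, h0]
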